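-- pv_equiv track=rewrite | github.com/neider1337/CodeWars | best_travel/main.py | choose_best_sum
-- ===== SOURCE A (Python) =====
-- import itertools
--
-- def choose_best_sum(t, k, ls):
--     best_sum = 0
--     for comb in itertools.combinations(ls, k):
--         if sum(comb) <= t and sum(comb) > best_sum:
--             best_sum = sum(comb)
--     if best_sum == 0:
--         return None
--     if best_sum > 0:
--         return best_sum
-- ===== SOURCE B (Python) =====
-- def choose_best_sum(t, k, ls):
--     # Iterative DFS over include/skip decisions with an explicit stack,
--     # keeping a running partial sum and pruning branches that cannot pick k elements.
--     best = None
--     n = len(ls)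
--     stack = [(0, k, 0)]
--     while stack:
--         acc, kk, i = stack.pop()
--         if kk == 0:
--             if 0 < acc <= t and (best is None or acc > best):
--                 best = acc
--             continue
--         if kk < 0 or kk > n - i:
--             continue
--         stack.append((acc, kk, i + 1))
--         stack.append((acc + ls[i], kk - 1, i + 1))
--     return best
-- ===== Notes on version B (the rewrite author's own statement) =====
-- stated objective: alternative
-- what changed: Replaces enumeration of all k-combinations via itertools with an explicit-stack include/skip DFS that threads a running partial sum, prunes branches that cannot still pick k elements, and updates a running best instead of materialising combinations.
import Mathlib
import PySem

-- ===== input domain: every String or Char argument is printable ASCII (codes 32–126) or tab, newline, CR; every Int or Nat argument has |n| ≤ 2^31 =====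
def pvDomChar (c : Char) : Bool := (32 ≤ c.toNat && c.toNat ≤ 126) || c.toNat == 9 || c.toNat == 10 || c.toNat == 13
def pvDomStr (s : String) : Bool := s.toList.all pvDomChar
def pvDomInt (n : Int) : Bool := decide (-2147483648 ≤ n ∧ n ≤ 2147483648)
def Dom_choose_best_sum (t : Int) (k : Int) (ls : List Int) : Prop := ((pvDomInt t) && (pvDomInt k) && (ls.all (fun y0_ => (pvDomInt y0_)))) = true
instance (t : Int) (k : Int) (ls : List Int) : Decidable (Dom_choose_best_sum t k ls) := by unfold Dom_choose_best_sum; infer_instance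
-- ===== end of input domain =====

-- B replaces the itertools.combinations enumeration with an explicit-stack include/skip DFS
-- threading a running partial sum (alternative decomposition; no speed claim; fuel only bounds the loop).


-- ===== PORT A =====
-- itertools.combinations(ls, k) (k ≥ 0 under Pre_)
def pvCombos : Nat → List Int → List (List Int)
  | 0, _ => [[]]
  | _ + 1, [] => []
  | k + 1, x :: xs => (pvCombos k xs).map (x :: ·) ++ pvCombos (k + 1) xs

def choose_best_sum (t : Int) (k : Int) (ls : List Int) : Option Int :=
  let best_sum :=
    (pvCombos k.toNat ls).foldl
      (fun b c => if c.sum ≤ t ∧ c.sum > b then c.sum else b) 0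
  if best_sum = 0 then none
  else if best_sum > 0 then some best_sum
  else none

-- ===== PORT B =====
-- the while-stack loop of Source B; stack top = list head (Python pops from the end);
-- the fuel argument only makes the loop structurally total — 3 ^ (ls.length + 1)
-- iterations provably suffice (lemma pvLoopF_eq_pvLoop below)
def pvLoopF (t : Int) (ls : List Int) : Nat → Option Int → List (Int × Int × Nat) → Option Int
  | 0, best, _ => best
  | _ + 1, best, [] => best
  | fuel + 1, best, (acc, kk, i) :: st =>
    if kk = 0 then
      pvLoopF t ls fuel
        (match best with
         | none => if 0 < acc ∧ acc ≤ t then some acc else none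
         | some b => if 0 < acc ∧ acc ≤ t ∧ acc > b then some acc else some b) st
    else if kk < 0 ∨ (ls.length : Int) - (i : Int) < kk then
      pvLoopF t ls fuel best st
    else
      pvLoopF t ls fuel best ((acc + ls.getD i 0, kk - 1, i + 1) :: (acc, kk, i + 1) :: st)

def choose_best_sum_alt (t : Int) (k : Int) (ls : List Int) : Option Int :=
  pvLoopF t ls (3 ^ (ls.length + 1)) none [(0, k, 0)]

-- ===== PRECONDITION & SPEC =====
-- excludes exactly k < 0, where itertools.combinations raises ValueError
def Pre_choose_best_sum (t : Int) (k : Int) (ls : List Int) : Prop := 0 ≤ k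
instance (t : Int) (k : Int) (ls : List Int) : Decidable (Pre_choose_best_sum t k ls) := by unfold Pre_choose_best_sum; infer_instance
def pvWitness_choose_best_sum : Int × Int × List Int := (10, 2, [1, 2, 3])

def Spec_choose_best_sum (t : Int) (k : Int) (ls : List Int) (out : Option Int) : Prop := out = choose_best_sum_alt t k ls
instance (t : Int) (k : Int) (ls : List Int) (out : Option Int) : Decidable (Spec_choose_best_sum t k ls out) := by unfold Spec_choose_best_sum; infer_instance

-- ===== CLAIM (what is proved, stated in full; the proofs are below) =====
def Claim_equal_choose_best_sum : Prop := ∀ (t : Int) (k : Int) (ls : List Int), Dom_choose_best_sum t k ls → Pre_choose_best_sum t k ls → Spec_choose_best_sum t k ls (choose_best_sum t k ls)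

-- ===== LEMMAS AND PROOFS =====

-- the stack measure: the loop strictly decreases it (pvMu_push), so 3^(n+1) fuel suffices
def pvMu (ls : List Int) (st : List (Int × Int × Nat)) : Nat :=
  (st.map (fun x => 3 ^ (ls.length + 1 - x.2.2))).sum

theorem pvMu_pos (ls : List Int) (item : Int × Int × Nat) (st : List (Int × Int × Nat)) :
    0 < pvMu ls (item :: st) := by
  have : 0 < 3 ^ (ls.length + 1 - item.2.2) := by positivity
  simp [pvMu] <;> omega

theorem pvMu_push (ls : List Int) (acc kk : Int) (i : Nat) (u1 v1 u2 v2 : Int) (st : List (Int × Int × Nat))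
    (hi : i < ls.length) :
    pvMu ls ((u1, v1, i + 1) :: (u2, v2, i + 1) :: st) < pvMu ls ((acc, kk, i) :: st) := by
  simp only [pvMu, List.map_cons, List.sum_cons]
  have h3 : 3 ^ (ls.length + 1 - i) = 3 * 3 ^ (ls.length + 1 - (i + 1)) := by
    rw [show ls.length + 1 - i = (ls.length + 1 - (i + 1)) + 1 by omega, pow_succ]; ring
  have hp : 0 < 3 ^ (ls.length + 1 - (i + 1)) := by positivity
  omega

-- WF twin of pvLoopF, used only in the proofs
def pvLoop (t : Int) (ls : List Int) : Option Int → List (Int × Int × Nat) → Option Int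
  | best, [] => best
  | best, (acc, kk, i) :: st =>
    if kk = 0 then
      pvLoop t ls
        (match best with
         | none => if 0 < acc ∧ acc ≤ t then some acc else none
         | some b => if 0 < acc ∧ acc ≤ t ∧ acc > b then some acc else some b) st
    else if kk < 0 ∨ (ls.length : Int) - (i : Int) < kk then
      pvLoop t ls best st
    else
      pvLoop t ls best ((acc + ls.getD i 0, kk - 1, i + 1) :: (acc, kk, i + 1) :: st)
  termination_by _ st => pvMu ls st
  decreasing_by
  · have := pvMu_pos ls (acc, kk, i) st; simp [pvMu] at * <;> omega
  · have := pvMu_pos ls (acc, kk, i) st; simp [pvMu] at * <;> omega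
  · exact pvMu_push ls acc kk i (acc + ls.getD i 0) (kk - 1) acc kk st (by omega)

theorem pvLoopF_cons (t : Int) (ls : List Int) (fuel : Nat) (best : Option Int) (acc kk : Int) (i : Nat) (st : List (Int × Int × Nat)) :
    pvLoopF t ls (fuel + 1) best ((acc, kk, i) :: st) =
    (if kk = 0 then
      pvLoopF t ls fuel
        (match best with
         | none => if 0 < acc ∧ acc ≤ t then some acc else none
         | some b => if 0 < acc ∧ acc ≤ t ∧ acc > b then some acc else some b) st
    else if kk < 0 ∨ (ls.length : Int) - (i : Int) < kk then
      pvLoopF t ls fuel best st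
    else
      pvLoopF t ls fuel best ((acc + ls.getD i 0, kk - 1, i + 1) :: (acc, kk, i + 1) :: st)) := rfl

theorem pvLoop_nil (t : Int) (ls : List Int) (best : Option Int) : pvLoop t ls best [] = best := by
  rw [pvLoop]

theorem pvLoop_cons (t : Int) (ls : List Int) (best : Option Int) (acc kk : Int) (i : Nat) (st : List (Int × Int × Nat)) :
    pvLoop t ls best ((acc, kk, i) :: st) =
    (if kk = 0 then
      pvLoop t ls
        (match best with
         | none => if 0 < acc ∧ acc ≤ t then some acc else none
         | some b => if 0 < acc ∧ acc ≤ t ∧ acc > b then some acc else some b) st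
    else if kk < 0 ∨ (ls.length : Int) - (i : Int) < kk then
      pvLoop t ls best st
    else
      pvLoop t ls best ((acc + ls.getD i 0, kk - 1, i + 1) :: (acc, kk, i + 1) :: st)) := by
  rw [pvLoop.eq_def]

theorem pvLoopF_eq_pvLoop (t : Int) (ls : List Int) :
    ∀ (fuel : Nat) (best : Option Int) (st : List (Int × Int × Nat)),
    pvMu ls st ≤ fuel → pvLoopF t ls fuel best st = pvLoop t ls best st := by
  intro fuel
  induction fuel with
  | zero =>
    intro best st h
    cases st with
    | nil => rw [pvLoop_nil]; rfl
    | cons item st => exact absurd h (by have := pvMu_pos ls item st; omega)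
  | succ fuel ih =>
    intro best st h
    cases st with
    | nil => rw [pvLoop_nil]; rfl
    | cons item st =>
      obtain ⟨acc, kk, i⟩ := item
      rw [pvLoopF_cons, pvLoop_cons]
      split
      · apply ih
        have : 0 < 3 ^ (ls.length + 1 - i) := by positivity
        simp [pvMu] at h ⊢; omega
      · split
        · apply ih
          have : 0 < 3 ^ (ls.length + 1 - i) := by positivity
          simp [pvMu] at h ⊢; omega
        · apply ih
          have hi : i < ls.length := by
            rename_i h0 hcond
            have h1 : ¬ kk < 0 := fun h => hcond (Or.inl h)
            have h2 : ¬ ((ls.length : Int) - (i : Int) < kk) := fun h => hcond (Or.inr h)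
            omega
          have := pvMu_push ls acc kk i (acc + ls.getD i 0) (kk - 1) acc kk st hi
          omega

-- option-valued max (the way B's running best combines with a candidate)
def pvMax2 : Option Int → Option Int → Option Int
  | none, b => b
  | some a, none => some a
  | some a, some b => some (max a b)

-- max of a list of ints as an Option
def pvMfold (l : List Int) : Option Int := l.foldr (fun x o => pvMax2 (some x) o) none

-- the value B's DFS computes from a state (acc, kk, suffix): max admissible completed sum
def pvG (t acc kk : Int) (l : List Int) : Option Int :=
  if kk < 0 then none
  else pvMfold (((pvCombos kk.toNat l).map (fun c => acc + c.sum)).filter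
        (fun s => decide (0 < s) && decide (s ≤ t)))

theorem pvMax2_assoc (a b c : Option Int) : pvMax2 (pvMax2 a b) c = pvMax2 a (pvMax2 b c) := by
  cases a <;> cases b <;> cases c <;> simp [pvMax2, max_assoc]

theorem pvMfold_cons (a : Int) (l : List Int) : pvMfold (a :: l) = pvMax2 (some a) (pvMfold l) := rfl

theorem pvMfold_eq_none (l : List Int) : pvMfold l = none ↔ l = [] := by
  cases l with
  | nil => simp [pvMfold]
  | cons a l => rw [pvMfold_cons]; cases pvMfold l <;> simp [pvMax2]

theorem pvMfold_append (a b : List Int) : pvMfold (a ++ b) = pvMax2 (pvMfold a) (pvMfold b) := by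
  induction a with
  | nil => rfl
  | cons x xs ih => rw [List.cons_append, pvMfold_cons, pvMfold_cons, ih, pvMax2_assoc]

theorem pvMfold_bound (l : List Int) (m : Int) (h : pvMfold l = some m) :
    m ∈ l ∧ ∀ x ∈ l, x ≤ m := by
  induction l generalizing m with
  | nil => simp [pvMfold] at h
  | cons a l ih =>
    rw [pvMfold_cons] at h
    cases hl : pvMfold l with
    | none =>
      rw [hl] at h
      simp [pvMax2] at h
      subst h
      rw [pvMfold_eq_none] at hl
      subst hl
      simp
    | some m' =>
      rw [hl] at h
      simp [pvMax2] at h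
      obtain ⟨hm', hb⟩ := ih m' hl
      subst h
      refine ⟨?_, ?_⟩
      · rcases le_total m' a with h1 | h1
        · simp [max_eq_left h1]
        · simp [max_eq_right h1]; right; exact hm'
      · intro x hx
        rcases List.mem_cons.mp hx with h | h
        · subst h; exact le_max_left _ _
        · exact le_trans (hb x h) (le_max_right _ _)

theorem pvMfold_eq_max (l : List Int) (m : Int) (hm : m ∈ l) (hb : ∀ x ∈ l, x ≤ m) :
    pvMfold l = some m := by
  induction l generalizing m with
  | nil => simp at hm
  | cons a l ih =>
    rw [pvMfold_cons]
    cases hl : pvMfold l with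
    | none =>
      rw [pvMfold_eq_none] at hl
      subst hl
      simp at hm
      subst hm
      rfl
    | some m' =>
      obtain ⟨hm'mem, hb'⟩ := pvMfold_bound l m' hl
      simp [pvMax2]
      have ham : a ≤ m := hb a (by simp)
      have hm'le : m' ≤ m := hb m' (by simp [hm'mem])
      rcases List.mem_cons.mp hm with h | h
      · subst h; exact max_eq_left hm'le
      · have : m ≤ m' := hb' m h
        have : m' = m := le_antisymm hm'le this
        subst this
        exact max_eq_right ham

-- pvCombos of a too-short list is empty
theorem pvCombos_nil_of_short (k : Nat) (l : List Int) (h : l.length < k) : pvCombos k l = [] := by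
  induction l generalizing k with
  | nil => cases k with | zero => omega | succ k => rfl
  | cons x xs ih =>
    cases k with
    | zero => omega
    | succ k =>
      simp only [pvCombos, List.append_eq_nil_iff]
      refine ⟨?_, ?_⟩
      · rw [ih k (by simp at h; omega)]; rfl
      · exact ih (k + 1) (by simp at h ⊢; omega)

-- pvG recurrence along the list, for kk > 0
theorem pvG_cons (t acc kk x : Int) (xs : List Int) (hk : 0 < kk) :
    pvG t acc kk (x :: xs) = pvMax2 (pvG t (acc + x) (kk - 1) xs) (pvG t acc kk xs) := by
  have hk0 : ¬ kk < 0 := by omega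
  have hk1 : ¬ kk - 1 < 0 := by omega
  obtain ⟨j, hj⟩ : ∃ j, kk.toNat = j + 1 := ⟨kk.toNat - 1, by omega⟩
  have hj' : (kk - 1).toNat = j := by omega
  unfold pvG
  rw [if_neg hk0, if_neg hk1, hj, hj']
  rw [show pvCombos (j + 1) (x :: xs) = (pvCombos j xs).map (x :: ·) ++ pvCombos (j + 1) xs from rfl]
  rw [List.map_append, List.filter_append, pvMfold_append]
  rw [List.map_map]
  have hmm : ((pvCombos j xs).map ((fun c => acc + c.sum) ∘ fun c => x :: c)) = (pvCombos j xs).map (fun c => acc + x + c.sum) := by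
    apply List.map_congr_left
    intro c _
    simp only [Function.comp_apply, List.sum_cons]
    ring
  rw [hmm, if_neg hk0]

-- one DFS step of the WF twin equals combining the running best with the state's value
theorem pvLoop_step (t : Int) (ls : List Int) :
    ∀ (m : Nat) (st : List (Int × Int × Nat)) (best : Option Int) (acc kk : Int) (i : Nat),
    i ≤ ls.length → ls.length - i = m →
    pvLoop t ls best ((acc, kk, i) :: st) = pvLoop t ls (pvMax2 best (pvG t acc kk (ls.drop i))) st := by
  intro m
  induction m using Nat.strong_induction_on with
  | _ m ih =>
    intro st best acc kk i hi hm
    rw [pvLoop_cons]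
    by_cases hk0 : kk = 0
    · subst hk0
      rw [if_pos rfl]
      have hbase : pvG t acc 0 (ls.drop i) = if 0 < acc ∧ acc ≤ t then some acc else none := by
        unfold pvG
        simp [pvCombos, pvMfold]
        by_cases h1 : 0 < acc <;> by_cases h2 : acc ≤ t <;> simp [h1, h2, pvMax2]
      have harg : (match best with
          | none => if 0 < acc ∧ acc ≤ t then some acc else none
          | some b => if 0 < acc ∧ acc ≤ t ∧ acc > b then some acc else some b)
          = pvMax2 best (pvG t acc 0 (ls.drop i)) := by
        rw [hbase]
        cases best with
        | none => by_cases h1 : 0 < acc ∧ acc ≤ t <;> simp [h1, pvMax2]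
        | some b =>
          by_cases h1 : 0 < acc <;> by_cases h2 : acc ≤ t <;> by_cases h3 : acc > b <;>
            simp [h1, h2, h3, pvMax2, max_def] <;> omega
      rw [harg]
    · rw [if_neg hk0]
      by_cases hpr : kk < 0 ∨ (ls.length : Int) - (i : Int) < kk
      · rw [if_pos hpr]
        have hnone : pvG t acc kk (ls.drop i) = none := by
          by_cases hneg : kk < 0
          · unfold pvG; rw [if_pos hneg]
          · have h : (ls.length : Int) - (i : Int) < kk := hpr.resolve_left hneg
            unfold pvG
            rw [if_neg hneg]
            rw [pvCombos_nil_of_short _ _ (by rw [List.length_drop]; omega)]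
            rfl
        rw [hnone]
        cases best <;> rfl
      · rw [if_neg hpr]
        have hnlt : ¬ kk < 0 := fun h => hpr (Or.inl h)
        have hnsh : ¬ ((ls.length : Int) - (i : Int) < kk) := fun h => hpr (Or.inr h)
        have hkpos : 0 < kk := by omega
        have hilt : i < ls.length := by omega
        have hdrop : ls.drop i = ls[i] :: ls.drop (i + 1) := List.drop_eq_getElem_cons hilt
        have hget : ls.getD i 0 = ls[i] := List.getD_eq_getElem ls 0 hilt
        rw [ih (m - 1) (by omega) ((acc, kk, i + 1) :: st) best (acc + ls.getD i 0) (kk - 1) (i + 1) (by omega) (by omega)]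
        rw [ih (m - 1) (by omega) st _ acc kk (i + 1) (by omega) (by omega)]
        rw [pvMax2_assoc, hget, hdrop, pvG_cons t acc kk ls[i] (ls.drop (i + 1)) hkpos]

theorem pvAlt_eq_G (t k : Int) (ls : List Int) :
    choose_best_sum_alt t k ls = pvG t 0 k ls := by
  unfold choose_best_sum_alt
  rw [pvLoopF_eq_pvLoop t ls _ none [(0, k, 0)] (by simp [pvMu])]
  rw [pvLoop_step t ls ls.length [] none 0 k 0 (by omega) (by omega), pvLoop_nil]
  rfl

-- A's fold computes the 0-seeded max of the ≤ t sums
theorem pvFoldA (t : Int) (l : List Int) (b : Int) :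
    l.foldl (fun b s => if s ≤ t ∧ s > b then s else b) b =
      (match pvMfold (l.filter (fun s => decide (s ≤ t))) with
       | none => b | some m => max b m) := by
  induction l generalizing b with
  | nil => rfl
  | cons s l ih =>
    by_cases hs : s ≤ t
    · have h1 : (if s ≤ t ∧ s > b then s else b) = max b s := by
        rcases lt_or_ge b s with h | h
        · simp [hs, h, max_eq_right (le_of_lt h)]
        · simp [hs, not_lt.mpr h, max_eq_left h]
      simp only [List.foldl, h1, ih]
      have hf : (s :: l).filter (fun s => decide (s ≤ t)) = s :: l.filter (fun s => decide (s ≤ t)) := by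
        simp [hs]
      rw [hf, pvMfold_cons]
      cases pvMfold (l.filter (fun s => decide (s ≤ t))) with
      | none => simp [pvMax2]
      | some m => simp [pvMax2, max_assoc]
    · have h1 : (if s ≤ t ∧ s > b then s else b) = b := by simp [hs]
      simp only [List.foldl, h1, ih]
      have hf : (s :: l).filter (fun s => decide (s ≤ t)) = l.filter (fun s => decide (s ≤ t)) := by
        simp [hs]
      rw [hf]

-- ===== VERDICT (by name: the statement is the Claim_ definition above) =====
theorem choose_best_sum_spec : Claim_equal_choose_best_sum := by
  intro t k ls _ hpre
  unfold Spec_choose_best_sum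
  rw [pvAlt_eq_G]
  unfold Pre_choose_best_sum at hpre
  unfold choose_best_sum
  simp only []
  have hfold : (pvCombos k.toNat ls).foldl (fun b c => if c.sum ≤ t ∧ c.sum > b then c.sum else b) 0
      = ((pvCombos k.toNat ls).map List.sum).foldl (fun b s => if s ≤ t ∧ s > b then s else b) 0 := by
    rw [List.foldl_map]
  rw [hfold]
  set l := (pvCombos k.toNat ls).map List.sum with hl
  rw [pvFoldA]
  unfold pvG
  have hknn : ¬ (k < 0) := by omega
  rw [if_neg hknn]
  have hmap : (pvCombos k.toNat ls).map (fun c => 0 + c.sum) = l := by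
    simp [hl]
  rw [hmap]
  have hff : l.filter (fun s => decide (0 < s) && decide (s ≤ t)) =
      (l.filter (fun s => decide (s ≤ t))).filter (fun s => decide (0 < s)) := by
    rw [List.filter_filter]
  rw [hff]
  set F := l.filter (fun s => decide (s ≤ t)) with hF
  cases hmf : pvMfold F with
  | none =>
    rw [pvMfold_eq_none] at hmf
    rw [hmf]
    simp [pvMfold]
  | some m =>
    rw [show (match some m with | none => (0:Int) | some mm => max 0 mm) = max 0 m from rfl]
    obtain ⟨hmem, hb⟩ := pvMfold_bound F m hmf
    by_cases hmpos : 0 < m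
    · have hM : max 0 m = m := max_eq_right (le_of_lt hmpos)
      rw [hM]
      have hP : pvMfold (F.filter (fun s => decide (0 < s))) = some m := by
        apply pvMfold_eq_max
        · rw [List.mem_filter]; exact ⟨hmem, by simpa using hmpos⟩
        · intro x hx
          exact hb x (List.mem_of_mem_filter hx)
      rw [hP]
      simp [show ¬ (m = 0) by omega, hmpos]
    · have hM : max 0 m = 0 := max_eq_left (by omega)
      rw [hM]
      have hP : F.filter (fun s => decide (0 < s)) = [] := by
        rw [List.filter_eq_nil_iff]
        intro x hx
        simpa using by have := hb x hx; omega
      rw [hP]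
      simp [pvMfold]
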